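-- pv_equiv track=rewrite | github.com/parven-dev/codewars | codewar/love_vs_friendship.py | words_to_marks
-- ===== SOURCE A (Python) =====
-- def words_to_marks(s):
--
--     words = {}
--     for x, chars in enumerate(range(97, 122+1)):
--         words[chr(chars)] = x+1
--
--     total = 0
--     for word in  s:
--         if word in words:
--             # valuess = words.get(word)
--             # total+=valuess
--             total+=words.get(word)
--
--     return total
-- ===== SOURCE B (Python) =====
-- def words_to_marks(s):
--     counts = {}
--     for ch in s:
--         counts[ch] = counts.get(ch, 0) + 1
--     return sum(cnt * (ord(ch) - 96) for ch, cnt in counts.items() if 'a' <= ch <= 'z')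
-- ===== Notes on version B (the rewrite author's own statement) =====
-- stated objective: alternative
-- what changed: B builds a character-frequency dict in one pass and sums count*(ord(ch)-96) over the distinct lowercase keys, instead of A's precomputed 26-entry letter->value dict consulted for every character of the string.
import Mathlib
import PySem

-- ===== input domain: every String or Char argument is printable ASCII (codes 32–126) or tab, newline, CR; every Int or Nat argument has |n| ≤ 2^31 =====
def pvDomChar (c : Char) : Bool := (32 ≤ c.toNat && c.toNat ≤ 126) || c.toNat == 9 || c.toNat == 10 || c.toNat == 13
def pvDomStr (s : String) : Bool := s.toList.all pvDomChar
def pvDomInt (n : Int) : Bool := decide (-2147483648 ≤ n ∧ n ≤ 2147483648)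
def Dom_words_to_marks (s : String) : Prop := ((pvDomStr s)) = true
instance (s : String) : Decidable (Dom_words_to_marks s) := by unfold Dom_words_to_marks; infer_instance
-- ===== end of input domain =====

-- B replaces A's per-character lookup in a precomputed 26-entry letter→value dict by a
-- frequency dict built from the string, summing count*(ord(ch)-96) over distinct lowercase keys
-- (objective: alternative decomposition; same exact results).

-- ===== PORT A =====
-- A's dict {chr(97+x): x+1} built by the enumerate(range(97,123)) loop
def wtmWords : PySem.Dict Char Int :=
  (PySem.List.enumerate (PySem.List.pyRange 97 123 1) 0).foldl
    (fun d p => d.insert (Char.ofNat p.2.toNat) (p.1 + 1)) PySem.Dict.empty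

def words_to_marks (s : String) : Int :=
  s.toList.foldl (fun total word =>
    if wtmWords.contains word then total + (wtmWords.get? word).getD 0 else total) 0

-- ===== PORT B =====
def words_to_marks_alt (s : String) : Int :=
  let counts : PySem.Dict Char Int :=
    s.toList.foldl (fun d ch => d.insert ch (d.getD ch 0 + 1)) PySem.Dict.empty
  ((counts.items.filter (fun p => 'a' ≤ p.1 ∧ p.1 ≤ 'z')).map
    (fun p => p.2 * ((p.1.toNat : Int) - 96))).sum

-- ===== PRECONDITION & SPEC =====
def Spec_words_to_marks (s : String) (out : Int) : Prop := out = words_to_marks_alt s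
instance (s : String) (out : Int) : Decidable (Spec_words_to_marks s out) := by unfold Spec_words_to_marks; infer_instance

-- ===== CLAIM (what is proved, stated in full; the proofs are below) =====
def Claim_equal_words_to_marks : Prop := ∀ (s : String), Dom_words_to_marks s → Spec_words_to_marks s (words_to_marks s)

-- ===== LEMMAS AND PROOFS =====

theorem char_le_iff (a c : Char) : a ≤ c ↔ a.toNat ≤ c.toNat := by
  rw [Char.le_def]; exact ⟨fun h => h, fun h => h⟩

theorem words_get (c : Char) :
    (wtmWords.get? c).getD 0 = if 'a' ≤ c ∧ c ≤ 'z' then (c.toNat : Int) - 96 else 0 := by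
  by_cases h : 'a' ≤ c ∧ c ≤ 'z'
  · obtain ⟨h1, h2⟩ := h
    rw [char_le_iff] at h1 h2
    have hc : c = Char.ofNat c.toNat := (Char.ofNat_toNat c).symm
    set n := c.toNat with hn
    have h1 : 97 ≤ n := h1
    have h2 : n ≤ 122 := h2
    clear_value n
    interval_cases n <;> subst hc <;> decide
  · have hne : ∀ k : Char, 97 ≤ k.toNat → k.toNat ≤ 122 → (k == c) = false := by
      intro k hk1 hk2
      simp only [beq_eq_false_iff_ne]
      rintro rfl
      rw [char_le_iff 'a' k, char_le_iff k 'z'] at h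
      simp at h
      omega
    have hw : wtmWords = PySem.Dict.mk [('a',1),('b',2),('c',3),('d',4),('e',5),('f',6),('g',7),('h',8),('i',9),('j',10),('k',11),('l',12),('m',13),('n',14),('o',15),('p',16),('q',17),('r',18),('s',19),('t',20),('u',21),('v',22),('w',23),('x',24),('y',25),('z',26)] := by decide
    rw [hw]
    simp [hne, h, PySem.Dict.get?]

theorem words_contains (c : Char) : wtmWords.contains c = decide ('a' ≤ c ∧ c ≤ 'z') := by
  by_cases h : 'a' ≤ c ∧ c ≤ 'z'
  · obtain ⟨h1, h2⟩ := h
    rw [char_le_iff] at h1 h2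
    have hc : c = Char.ofNat c.toNat := (Char.ofNat_toNat c).symm
    set n := c.toNat with hn
    have h1 : 97 ≤ n := h1
    have h2 : n ≤ 122 := h2
    clear_value n
    interval_cases n <;> subst hc <;> decide
  · have hne : ∀ k : Char, 97 ≤ k.toNat → k.toNat ≤ 122 → (k == c) = false := by
      intro k hk1 hk2
      simp only [beq_eq_false_iff_ne]
      rintro rfl
      rw [char_le_iff 'a' k, char_le_iff k 'z'] at h
      simp at h
      omega
    have hw : wtmWords = PySem.Dict.mk [('a',1),('b',2),('c',3),('d',4),('e',5),('f',6),('g',7),('h',8),('i',9),('j',10),('k',11),('l',12),('m',13),('n',14),('o',15),('p',16),('q',17),('r',18),('s',19),('t',20),('u',21),('v',22),('w',23),('x',24),('y',25),('z',26)] := by decide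
    rw [hw]
    simp [PySem.Dict.contains_mk, hne, h]

-- sum over a nodup key list of [k == x] * g k picks out g x
theorem sum_map_single {g : Char → Int} {S : List Char} {x : Char}
    (hS : S.Nodup) (hx : x ∈ S) :
    (S.map (fun k => if k = x then g k else 0)).sum = g x := by
  induction S with
  | nil => cases hx
  | cons a S' ih =>
    rcases List.nodup_cons.mp hS with ⟨ha, hS'⟩
    by_cases hax : a = x
    · subst hax
      have hzero : (S'.map (fun k => if k = a then g k else 0)).sum = 0 := by
        apply List.sum_eq_zero
        intro y hy
        rcases List.mem_map.mp hy with ⟨k, hk, rfl⟩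
        have hka : k ≠ a := fun hEq => ha (hEq ▸ hk)
        simp [hka]
      simp [hzero]
    · have hxS' : x ∈ S' := by
        rcases List.mem_cons.mp hx with h | h
        · exact absurd h.symm hax
        · exact h
      simp [hax, ih hS' hxS']

-- a multiplicity-weighted sum over any nodup superset of l's elements is the plain sum over l
theorem sum_weighted {g : Char → Int} (S : List Char) (l : List Char)
    (hS : S.Nodup) (hsub : ∀ x ∈ l, x ∈ S) :
    (S.map (fun k => (l.count k : Int) * g k)).sum = (l.map g).sum := by
  induction l with
  | nil => simp
  | cons x t ih =>
    have hsub' : ∀ y ∈ t, y ∈ S := fun y hy => hsub y (List.mem_cons_of_mem x hy)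
    have hxS : x ∈ S := hsub x (List.mem_cons_self)
    have hsplit : ∀ k : Char,
        ((x :: t).count k : Int) * g k
          = (t.count k : Int) * g k + (if k = x then g k else 0) := by
      intro k
      rw [List.count_cons]
      by_cases hk : k = x
      · subst hk; simp; ring
      · simp [hk]
        exact Or.inl (fun h => hk h.symm)
    calc (S.map (fun k => ((x :: t).count k : Int) * g k)).sum
        = (S.map (fun k => (t.count k : Int) * g k + (if k = x then g k else 0))).sum := by
          congr 1
          exact List.map_congr_left (fun k _ => hsplit k)
      _ = (S.map (fun k => (t.count k : Int) * g k)).sum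
            + (S.map (fun k => if k = x then g k else 0)).sum := by
          rw [PySem.List.sum_map_add_int]
      _ = (t.map g).sum + g x := by rw [ih hsub', sum_map_single hS hxS]
      _ = ((x :: t).map g).sum := by simp [add_comm]

-- ===== VERDICT (by name: the statement is the Claim_ definition above) =====
theorem words_to_marks_spec : Claim_equal_words_to_marks := by
  intro s _
  unfold Spec_words_to_marks words_to_marks words_to_marks_alt
  set l := s.toList with hl
  -- A side: rewrite the per-character loop into a sum over the lowercase filter
  have hA : l.foldl (fun total word =>
      if wtmWords.contains word then total + (wtmWords.get? word).getD 0 else total) 0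
      = ((l.filter (fun c => decide ('a' ≤ c ∧ c ≤ 'z'))).map
          (fun c => (c.toNat : Int) - 96)).sum := by
    have hcongr : ∀ (total : Int) (c : Char), c ∈ l →
        (if wtmWords.contains c then total + (wtmWords.get? c).getD 0 else total)
          = (if ('a' ≤ c ∧ c ≤ 'z') then total + ((c.toNat : Int) - 96) else total) := by
      intro total c _
      rw [words_contains, words_get]
      by_cases h : 'a' ≤ c ∧ c ≤ 'z' <;> simp [h]
    rw [PySem.List.foldl_congr_mem _ _ _ _ hcongr,
        PySem.List.foldl_ite_eq_foldl_filter (fun c => 'a' ≤ c ∧ c ≤ 'z')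
          (fun total c => total + ((c.toNat : Int) - 96)),
        PySem.List.foldl_add (l.filter (fun x => decide ('a' ≤ x ∧ x ≤ 'z'))) (fun c : Char => (c.toNat : Int) - 96)]
    simp
  -- B side: the counter's filtered items give the weighted sum over distinct lowercase chars
  have hB : ((((l.foldl (fun d ch => d.insert ch (d.getD ch 0 + 1))
        PySem.Dict.empty)).items.filter (fun p => 'a' ≤ p.1 ∧ p.1 ≤ 'z')).map
        (fun p => p.2 * ((p.1.toNat : Int) - 96))).sum
      = (((PySem.Set.ofList l).filter (fun c => decide ('a' ≤ c ∧ c ≤ 'z'))).map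
          (fun c => (l.count c : Int) * ((c.toNat : Int) - 96))).sum := by
    rw [PySem.Dict.foldl_insert_getD_add_one_eq_counter, PySem.Dict.items_counter,
        List.filter_map, List.map_map]
    rfl
  rw [hA, hB]
  -- reshape: weighted sum over distinct lowercase chars = plain sum over lowercase occurrences
  set p : Char → Bool := fun c => decide ('a' ≤ c ∧ c ≤ 'z') with hp
  have hcnt : ∀ c ∈ (PySem.Set.ofList l).filter p,
      (l.count c : Int) = ((l.filter p).count c : Int) := by
    intro c hc
    have hpc : p c = true := (List.mem_filter.mp hc).2
    rw [List.count_filter]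
    simp [hpc]
  calc ((l.filter p).map (fun c => (c.toNat : Int) - 96)).sum
      = (((PySem.Set.ofList l).filter p).map
          (fun c => ((l.filter p).count c : Int) * ((c.toNat : Int) - 96))).sum := by
        exact (sum_weighted ((PySem.Set.ofList l).filter p) (l.filter p)
          (List.Nodup.filter p (PySem.Set.nodup_ofList l))
          (fun x hx => List.mem_filter.mpr
            ⟨(PySem.Set.mem_ofList l x).mpr (List.mem_of_mem_filter hx), (List.mem_filter.mp hx).2⟩)).symm
    _ = (((PySem.Set.ofList l).filter p).map
          (fun c => (l.count c : Int) * ((c.toNat : Int) - 96))).sum := by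
        congr 1
        exact List.map_congr_left (fun c hc => by rw [hcnt c hc])
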